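-- pv_equiv track=rewrite | github.com/xxtt20/202209_03cit4057 | lab06/src/22571724/lab_6393387A_1.py | findMaxCharInString
-- ===== SOURCE A (Python) =====
-- def findMaxCharInString( astring ):
--     maxCharIndex = 0
--     charCounts = [0]*26
--     for c in astring:
--         c = c.lower()
--         if 'a' <= c <= 'z':
--             charCounts[ord(c)-ord('a')] += 1
--     maxCharCount = max(charCounts)
--     maxCharIndex = charCounts.index(maxCharCount)
--     return maxCharIndex
-- ===== SOURCE B (Python) =====
-- def findMaxCharInString(astring):
--     letters = sorted(c for c in astring.lower() if 'a' <= c <= 'z')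
--     best_idx = 0
--     best_cnt = 0
--     i = 0
--     n = len(letters)
--     while i < n:
--         j = i
--         while j < n and letters[j] == letters[i]:
--             j += 1
--         if best_cnt < j - i:
--             best_cnt = j - i
--             best_idx = ord(letters[i]) - ord('a')
--         i = j
--     return best_idx
-- ===== Notes on version B (the rewrite author's own statement) =====
-- stated objective: alternative
-- what changed: Replaces the 26-slot counting table with max()+.index() argmax by a sort-then-scan algorithm: the letters are sorted and a single run-scan over the sorted list keeps the first longest run, whose letter gives the index (first-run-wins reproduces the alphabetical tie-break and the 0 default).
import Mathlib
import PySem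

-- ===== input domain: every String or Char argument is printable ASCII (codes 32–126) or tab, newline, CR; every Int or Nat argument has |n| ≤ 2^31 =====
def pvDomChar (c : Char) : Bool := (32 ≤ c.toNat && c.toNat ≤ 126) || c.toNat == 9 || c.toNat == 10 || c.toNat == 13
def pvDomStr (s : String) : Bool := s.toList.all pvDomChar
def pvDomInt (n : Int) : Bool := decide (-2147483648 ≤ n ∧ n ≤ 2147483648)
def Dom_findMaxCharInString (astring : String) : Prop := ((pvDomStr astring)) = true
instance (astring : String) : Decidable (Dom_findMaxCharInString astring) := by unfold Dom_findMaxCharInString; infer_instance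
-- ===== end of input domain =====

-- B replaces A's 26-slot counting table + max() + .index() argmax by a different algorithm:
-- sort the (lowercased) letters, then scan the sorted list once keeping the first longest
-- run; that run's letter gives the index (first-run-wins reproduces A's alphabetical
-- tie-break, and 0 is returned when no letter occurs).

-- ===== PORT A =====
-- A's loop body: c = c.lower(); if 'a' <= c <= 'z': charCounts[ord(c)-ord('a')] += 1
-- (the guard makes (lowerChar c).toNat ≥ 97, so the Nat subtraction is Python's exact ord(c)-97)
def pvStepA (tbl : List Int) (c : Char) : List Int :=
  if 'a' ≤ PySem.Chars.lowerChar c ∧ PySem.Chars.lowerChar c ≤ 'z' then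
    tbl.modify ((PySem.Chars.lowerChar c).toNat - 97) (· + 1)
  else tbl

def findMaxCharInString (astring : String) : Int :=
  let charCounts : List Int := astring.toList.foldl pvStepA (List.replicate 26 0)
  match PySem.List.max? charCounts (fun x => x) with
  | none => 0        -- unreachable: the table always has 26 entries (Python max raises only on [])
  | some maxCharCount => ((PySem.List.index? charCounts maxCharCount).getD 0 : Nat)

-- ===== PORT B =====
-- the two nested while loops over indices i, j of Source B, transcribed as the recursion on the
-- suffix letters[i:]: the inner while advances j over the run of letters equal to letters[i]
-- (= takeWhile), the outer loop resumes at i = j (= dropWhile)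
def pvRunScan : List Char → Nat → Nat → Nat
  | [], bestIdx, _ => bestIdx
  | c :: rest, bestIdx, bestCnt =>
      let run := 1 + (rest.takeWhile (· == c)).length
      if bestCnt < run then pvRunScan (rest.dropWhile (· == c)) (c.toNat - 97) run
      else pvRunScan (rest.dropWhile (· == c)) bestIdx bestCnt
  termination_by l => l.length
  decreasing_by all_goals
    exact Nat.lt_succ_of_le (List.length_dropWhile_le _ _)

def findMaxCharInString_alt (astring : String) : Int :=
  let letters : List Char :=
    PySem.List.sorted ((PySem.Chars.lower astring.toList).filter
      (fun c => decide ('a' ≤ c) && decide (c ≤ 'z'))) (fun x => x) false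
  (pvRunScan letters 0 0 : Nat)

-- ===== PRECONDITION & SPEC =====
def Spec_findMaxCharInString (astring : String) (out : Int) : Prop := out = findMaxCharInString_alt astring
instance (astring : String) (out : Int) : Decidable (Spec_findMaxCharInString astring out) := by unfold Spec_findMaxCharInString; infer_instance

-- ===== CLAIM (what is proved, stated in full; the proofs are below) =====
def Claim_equal_findMaxCharInString : Prop := ∀ (astring : String), Dom_findMaxCharInString astring → Spec_findMaxCharInString astring (findMaxCharInString astring)

-- ===== LEMMAS AND PROOFS =====

-- the letter count table entry i counts the characters whose lowercase is chr(97+i)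
def pvCnt (l : List Char) (i : Nat) : Int :=
  (l.countP (fun x => PySem.Chars.lowerChar x == Char.ofNat (97 + i)) : Int)

-- "r is the first index (< 26) of a maximal entry of the count table of l"
def pvGood (l : List Char) (r : Nat) : Prop :=
  r < 26 ∧ (∀ i < 26, pvCnt l i ≤ pvCnt l r) ∧ (∀ j < r, pvCnt l j < pvCnt l r)

theorem pvGood_unique (l : List Char) (r1 r2 : Nat) (h1 : pvGood l r1) (h2 : pvGood l r2) :
    r1 = r2 := by
  obtain ⟨hr1, hle1, hlt1⟩ := h1
  obtain ⟨hr2, hle2, hlt2⟩ := h2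
  rcases Nat.lt_trichotomy r1 r2 with h | h | h
  · exact absurd (hle1 r2 hr2) (not_le.mpr (hlt2 r1 h))
  · exact h
  · exact absurd (hle2 r1 hr1) (not_le.mpr (hlt1 r2 h))

-- small Char arithmetic facts
theorem pv_char_eq_of_toNat (a b : Char) (h : a.toNat = b.toNat) : a = b :=
  Char.ext (UInt32.toNat_inj.mp h)

theorem pv_le_toNat {d : Char} (h : 'a' ≤ d) : 97 ≤ d.toNat :=
  UInt32.le_iff_toNat_le.mp (Char.le_def.mp h)
theorem pv_toNat_le {d : Char} (h : d ≤ 'z') : d.toNat ≤ 122 :=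
  UInt32.le_iff_toNat_le.mp (Char.le_def.mp h)
theorem pv_le_of_toNat {d : Char} (h : 97 ≤ d.toNat) : 'a' ≤ d :=
  Char.le_def.mpr (UInt32.le_iff_toNat_le.mpr h)
theorem pv_toNat_le_of {d : Char} (h : d.toNat ≤ 122) : d ≤ 'z' :=
  Char.le_def.mpr (UInt32.le_iff_toNat_le.mpr h)
theorem pv_lt_of_toNat {a b : Char} (h : a.toNat < b.toNat) : a < b :=
  Char.lt_def.mpr (UInt32.lt_iff_toNat_lt.mpr h)

theorem pv_toNat_ofNat_letter (i : Nat) (h : i < 26) : (Char.ofNat (97 + i)).toNat = 97 + i := by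
  rw [Char.toNat_ofNat, if_pos]
  left; omega

-- ---------- A side ----------

theorem pv_length_stepA (tbl : List Int) (c : Char) : (pvStepA tbl c).length = tbl.length := by
  unfold pvStepA; split <;> simp

theorem pv_length_foldA :
    ∀ (l : List Char) (tbl : List Int), (l.foldl pvStepA tbl).length = tbl.length := by
  intro l
  induction l with
  | nil => intro tbl; rfl
  | cons c t ih => intro tbl; rw [List.foldl_cons, ih, pv_length_stepA]

theorem pv_foldA_getElem :
    ∀ (l : List Char) (tbl : List Int) (i : Nat) (hi : i < tbl.length) (h26 : i < 26)
      (hi' : i < (l.foldl pvStepA tbl).length),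
      (l.foldl pvStepA tbl)[i] =
        tbl[i] + (l.countP (fun x => PySem.Chars.lowerChar x == Char.ofNat (97 + i)) : Int) := by
  intro l
  induction l with
  | nil => intro tbl i hi _ hi'; simp
  | cons c t ih =>
    intro tbl i hi h26 hi'
    simp only [List.foldl_cons, List.countP_cons]
    have hlen : (pvStepA tbl c).length = tbl.length := pv_length_stepA tbl c
    rw [ih (pvStepA tbl c) i (by omega) h26 (by simpa using hi')]
    have htn : (Char.ofNat (97 + i)).toNat = 97 + i := pv_toNat_ofNat_letter i h26
    unfold pvStepA
    split_ifs with hab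
    · have h1 : 97 ≤ (PySem.Chars.lowerChar c).toNat := pv_le_toNat hab.1
      have h2 : (PySem.Chars.lowerChar c).toNat ≤ 122 := pv_toNat_le hab.2
      rw [List.getElem_modify]
      by_cases heq : (PySem.Chars.lowerChar c).toNat - 97 = i
      · have hde : PySem.Chars.lowerChar c = Char.ofNat (97 + i) :=
          pv_char_eq_of_toNat _ _ (by omega)
        simp [hde, htn]
        ring
      · have hne : ¬ ((PySem.Chars.lowerChar c == Char.ofNat (97 + i)) = true) := by
          simp only [beq_iff_eq]
          intro hc
          exact heq (by rw [hc, htn]; omega)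
        simp [heq, hne]
    · have hne : ¬ ((PySem.Chars.lowerChar c == Char.ofNat (97 + i)) = true) := by
        simp only [beq_iff_eq]
        intro hc
        have h97 : (PySem.Chars.lowerChar c).toNat = 97 + i := by rw [hc, htn]
        exact hab ⟨pv_le_of_toNat (by omega), pv_toNat_le_of (by omega)⟩
      simp [hne]

-- the table A builds is the count table
theorem pv_tableA (l : List Char) :
    l.foldl pvStepA (List.replicate 26 0) = (List.range 26).map (fun i => pvCnt l i) := by
  apply List.ext_getElem
  · simp [pv_length_foldA]
  · intro i hi hi'
    have h26 : i < 26 := by rw [pv_length_foldA] at hi; simpa using hi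
    rw [pv_foldA_getElem l (List.replicate 26 0) i (by simpa) h26 hi]
    simp only [List.getElem_map, List.getElem_range, List.getElem_replicate, pvCnt]
    omega

-- A's result is the first index of a maximal table entry
theorem pv_A_good (l : List Char) :
    ∃ r : Nat, pvGood l r ∧
      (match PySem.List.max? (l.foldl pvStepA (List.replicate 26 0)) (fun x => x) with
       | none => (0 : Int)
       | some m => ((PySem.List.index? (l.foldl pvStepA (List.replicate 26 0)) m).getD 0 : Nat)) = (r : Int) := by
  rw [pv_tableA]
  set T : List Int := (List.range 26).map (fun i => pvCnt l i) with hT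
  have hTne : T ≠ [] := by simp [hT]
  have hlen : T.length = 26 := by simp [hT]
  obtain ⟨M, hM⟩ : ∃ M, PySem.List.max? T (fun x => x) = some M := by
    rcases hmx : PySem.List.max? T (fun x => x) with _ | M
    · exact absurd ((PySem.List.max?_eq_none_iff _ _).mp hmx) hTne
    · exact ⟨M, rfl⟩
  have hMmem : M ∈ T := PySem.List.max?_mem hM
  have hMmax : ∀ y ∈ T, y ≤ M := PySem.List.max?_isMax hM
  obtain ⟨r, hr⟩ : ∃ r, PySem.List.index? T M = some r := by
    rcases hix : PySem.List.index? T M with _ | r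
    · exact absurd ((PySem.List.index?_eq_none_iff _ _).mp hix) (by simpa using hMmem)
    · exact ⟨r, rfl⟩
  obtain ⟨hrlt, hTr, hfirst⟩ := PySem.List.getElem_of_index?_eq_some hr
  have hr26 : r < 26 := by omega
  have hTget : ∀ j (hj : j < 26), T[j]'(by omega) = pvCnt l j := by
    intro j hj
    simp [hT]
  have hTr' : pvCnt l r = M := by rw [← hTget r hr26]; exact hTr
  refine ⟨r, ⟨hr26, ?_, ?_⟩, ?_⟩
  · intro i hi
    rw [hTr']
    exact hMmax _ (by rw [hT]; exact List.mem_map.mpr ⟨i, by simpa using hi, rfl⟩)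
  · intro j hj
    have hj26 : j < 26 := by omega
    have hne : pvCnt l j ≠ M := by rw [← hTget j hj26]; exact hfirst j hj
    have hle : pvCnt l j ≤ M := by rw [← hTget j hj26]; exact hMmax _ (List.getElem_mem _)
    rw [hTr']
    exact lt_of_le_of_ne hle hne
  · rw [hM]
    have hr' : List.idxOf? M T = some r := by rw [← PySem.List.index?_eq_idxOf?]; exact hr
    simp [hr']

-- ---------- B side ----------

-- the runs of a list: (first char, run length) of each maximal block of equal heads
def pvRuns : List Char → List (Char × Nat)
  | [] => []
  | c :: rest => (c, 1 + (rest.takeWhile (· == c)).length) :: pvRuns (rest.dropWhile (· == c))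
  termination_by l => l.length
  decreasing_by all_goals
    exact Nat.lt_succ_of_le (List.length_dropWhile_le _ _)

-- the strict-improvement argmax fold pvRunScan computes over the runs
def pvArgFold : List (Char × Nat) → Nat → Nat → Nat
  | [], bestIdx, _ => bestIdx
  | (c, n) :: rs, bestIdx, bestCnt =>
      if bestCnt < n then pvArgFold rs (c.toNat - 97) n
      else pvArgFold rs bestIdx bestCnt

theorem pv_runScan_eq_argFold (l : List Char) :
    ∀ bi bc, pvRunScan l bi bc = pvArgFold (pvRuns l) bi bc := by
  have H : ∀ (n : Nat) (l : List Char), l.length ≤ n →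
      ∀ bi bc, pvRunScan l bi bc = pvArgFold (pvRuns l) bi bc := by
    intro n
    induction n with
    | zero =>
      intro l h bi bc
      rw [Nat.le_zero, List.length_eq_zero_iff] at h
      subst h
      simp [pvRunScan, pvRuns, pvArgFold]
    | succ n ih =>
      intro l h bi bc
      cases l with
      | nil => simp [pvRunScan, pvRuns, pvArgFold]
      | cons c rest =>
        rw [pvRunScan, pvRuns]
        simp only [pvArgFold]
        have hlen : (rest.dropWhile (· == c)).length ≤ n :=
          le_trans (List.length_dropWhile_le _ _) (by simpa using Nat.le_of_succ_le_succ h)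
        split <;> exact ih _ hlen _ _
  exact H l.length l le_rfl

theorem pv_argFold_const : ∀ (rs : List (Char × Nat)) (bi bc : Nat),
    (∀ p ∈ rs, p.2 ≤ bc) → pvArgFold rs bi bc = bi := by
  intro rs
  induction rs with
  | nil => intro bi bc _; rfl
  | cons p rs ih =>
    intro bi bc h
    obtain ⟨c, n⟩ := p
    have hn : n ≤ bc := h (c, n) List.mem_cons_self
    simp only [pvArgFold, if_neg (not_lt.mpr hn)]
    exact ih bi bc (fun q hq => h q (List.mem_cons_of_mem _ hq))

theorem pv_argFold_spec : ∀ (rs : List (Char × Nat)) (bi bc : Nat),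
    (∃ p ∈ rs, bc < p.2) →
    ∃ k, ∃ hk : k < rs.length,
      pvArgFold rs bi bc = rs[k].1.toNat - 97 ∧ bc < rs[k].2 ∧
      (∀ j, ∀ hj : j < rs.length, rs[j].2 ≤ rs[k].2) ∧
      (∀ j, ∀ hj : j < k, (rs[j]'(Nat.lt_trans hj hk)).2 < rs[k].2) := by
  intro rs
  induction rs with
  | nil => intro bi bc h; simp at h
  | cons p rs ih =>
    intro bi bc h
    obtain ⟨c, n⟩ := p
    by_cases hb : bc < n
    · by_cases hall : ∀ q ∈ rs, q.2 ≤ n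
      · refine ⟨0, by simp, ?_, by simpa using hb, ?_, ?_⟩
        · simp only [pvArgFold, if_pos hb]
          simpa using pv_argFold_const rs (c.toNat - 97) n hall
        · intro j hj
          cases j with
          | zero => simp
          | succ j =>
            simp only [List.getElem_cons_succ, List.getElem_cons_zero]
            exact hall _ (List.getElem_mem _)
        · intro j hj
          exact absurd hj (Nat.not_lt_zero j)
      · rw [not_forall] at hall
        simp only [not_forall, not_le, exists_prop] at hall
        obtain ⟨q, hq, hqn⟩ := hall
        obtain ⟨k, hk, h1, h2, h3, h4⟩ := ih (c.toNat - 97) n ⟨q, hq, hqn⟩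
        refine ⟨k + 1, by simpa using Nat.succ_lt_succ hk, ?_, ?_, ?_, ?_⟩
        · simp only [pvArgFold, if_pos hb, List.getElem_cons_succ]
          exact h1
        · simpa using lt_trans hb h2
        · intro j hj
          cases j with
          | zero => simpa using le_of_lt h2
          | succ j =>
            simp only [List.getElem_cons_succ]
            exact h3 j (by simpa using hj)
        · intro j hj
          cases j with
          | zero => simpa using h2
          | succ j =>
            simp only [List.getElem_cons_succ]
            exact h4 j (by omega)
    · have hrest : ∃ p ∈ rs, bc < p.2 := by
        rcases h with ⟨q, hq, hlt⟩
        rcases List.mem_cons.mp hq with rfl | hq'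
        · exact absurd hlt hb
        · exact ⟨q, hq', hlt⟩
      obtain ⟨k, hk, h1, h2, h3, h4⟩ := ih bi bc hrest
      have hnb : n ≤ bc := not_lt.mp hb
      refine ⟨k + 1, by simpa using Nat.succ_lt_succ hk, ?_, ?_, ?_, ?_⟩
      · simp only [pvArgFold, if_neg hb, List.getElem_cons_succ]
        exact h1
      · simpa using h2
      · intro j hj
        cases j with
        | zero => simpa using le_of_lt (lt_of_le_of_lt hnb h2)
        | succ j =>
          simp only [List.getElem_cons_succ]
          exact h3 j (by simpa using hj)
      · intro j hj
        cases j with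
        | zero => simpa using lt_of_le_of_lt hnb h2
        | succ j =>
          simp only [List.getElem_cons_succ]
          exact h4 j (by omega)

theorem pv_mem_takeWhile (l : List Char) (x : Char) (p : Char → Bool)
    (h : x ∈ l.takeWhile p) : p x = true := by
  induction l with
  | nil => simp at h
  | cons a t ih =>
    rw [List.takeWhile_cons] at h
    by_cases hp : p a
    · simp [hp] at h
      rcases h with h | h
      · subst h; exact hp
      · exact ih h
    · simp [hp] at h

theorem pv_head_dropWhile (l : List Char) (p : Char → Bool) (d : Char) (t : List Char)
    (h : l.dropWhile p = d :: t) : p d = false := by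
  have hne : l.dropWhile p ≠ [] := by simp [h]
  have := List.head_dropWhile_not p hne
  simpa [h] using this

-- properties of the runs of a sorted list: each run is (a char of l, its count in l),
-- every char of l heads some run, and the run heads are strictly increasing
theorem pv_runs_sorted : ∀ (l : List Char), l.Pairwise (· ≤ ·) →
    (∀ p ∈ pvRuns l, p.1 ∈ l ∧ p.2 = l.count p.1) ∧
    (∀ c ∈ l, ∃ n, (c, n) ∈ pvRuns l) ∧
    ((pvRuns l).map Prod.fst).Pairwise (· < ·) := by
  have H : ∀ (n : Nat) (l : List Char), l.length ≤ n → l.Pairwise (· ≤ ·) →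
      (∀ p ∈ pvRuns l, p.1 ∈ l ∧ p.2 = l.count p.1) ∧
      (∀ c ∈ l, ∃ n, (c, n) ∈ pvRuns l) ∧
      ((pvRuns l).map Prod.fst).Pairwise (· < ·) := by
    intro n
    induction n with
    | zero =>
      intro l h _
      rw [Nat.le_zero, List.length_eq_zero_iff] at h
      subst h
      simp [pvRuns]
    | succ n ih =>
      intro l h hpw
      cases l with
      | nil => simp [pvRuns]
      | cons c rest =>
        have hc : ∀ x ∈ rest, c ≤ x := (List.pairwise_cons.mp hpw).1
        have hrpw : rest.Pairwise (· ≤ ·) := (List.pairwise_cons.mp hpw).2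
        have htw : ∀ x ∈ rest.takeWhile (· == c), x = c := by
          intro x hx
          have := pv_mem_takeWhile _ _ _ hx
          simpa using this
        have hdwsub : (rest.dropWhile (· == c)).Sublist rest := List.dropWhile_sublist _
        have hdwpw : (rest.dropWhile (· == c)).Pairwise (· ≤ ·) := hrpw.sublist hdwsub
        have hgt : ∀ x ∈ rest.dropWhile (· == c), c < x := by
          cases hdw : rest.dropWhile (· == c) with
          | nil => simp
          | cons d t =>
            have hd : (d == c) = false := pv_head_dropWhile rest _ d t hdw
            have hdne : d ≠ c := by simpa using hd
            have hcd : c < d :=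
              lt_of_le_of_ne (hc d (hdwsub.subset (hdw ▸ List.mem_cons_self))) (Ne.symm hdne)
            intro x hx
            rcases List.mem_cons.mp hx with rfl | hx'
            · exact hcd
            · have hdt : ∀ y ∈ t, d ≤ y := (List.pairwise_cons.mp (hdw ▸ hdwpw)).1
              exact lt_of_lt_of_le hcd (hdt x hx')
        have hnotin : c ∉ rest.dropWhile (· == c) := fun hx => lt_irrefl c (hgt c hx)
        have hsplit : rest.takeWhile (· == c) ++ rest.dropWhile (· == c) = rest :=
          List.takeWhile_append_dropWhile
        have hrest_c : rest.count c = (rest.takeWhile (· == c)).length := by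
          conv_lhs => rw [← hsplit]
          rw [List.count_append, List.count_eq_length.mpr (fun b hb => (htw b hb).symm),
            List.count_eq_zero.mpr hnotin]
          omega
        have hcount_c : (c :: rest).count c = 1 + (rest.takeWhile (· == c)).length := by
          rw [List.count_cons_self, hrest_c]
          omega
        have hcount_ne : ∀ d, c < d →
            (c :: rest).count d = (rest.dropWhile (· == c)).count d := by
          intro d hd
          have hdc : d ≠ c := fun hh => lt_irrefl c (hh ▸ hd)
          have hrest_d : rest.count d = (rest.dropWhile (· == c)).count d := by
            conv_lhs => rw [← hsplit]
            rw [List.count_append, List.count_eq_zero.mpr (fun hm => hdc ((htw d hm))),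
              Nat.zero_add]
          rw [List.count_cons_of_ne hdc.symm, hrest_d]
        have hlen : (rest.dropWhile (· == c)).length ≤ n :=
          le_trans (List.length_dropWhile_le _ _) (by simpa using Nat.le_of_succ_le_succ h)
        obtain ⟨ih1, ih2, ih3⟩ := ih _ hlen hdwpw
        rw [pvRuns]
        refine ⟨?_, ?_, ?_⟩
        · intro p hp
          rcases List.mem_cons.mp hp with rfl | hp'
          · exact ⟨List.mem_cons_self, by simpa using hcount_c.symm⟩
          · obtain ⟨hmem, hcnt⟩ := ih1 p hp'
            refine ⟨List.mem_cons_of_mem _ (hsplit ▸ List.mem_append_right _ hmem), ?_⟩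
            rw [hcount_ne p.1 (hgt _ hmem)]
            exact hcnt
        · intro x hx
          rcases List.mem_cons.mp hx with rfl | hx'
          · exact ⟨_, List.mem_cons_self⟩
          · rw [← hsplit] at hx'
            rcases List.mem_append.mp hx' with hx'' | hx''
            · rw [htw x hx'']
              exact ⟨_, List.mem_cons_self⟩
            · obtain ⟨m, hm⟩ := ih2 x hx''
              exact ⟨m, List.mem_cons_of_mem _ hm⟩
        · rw [List.map_cons]
          refine List.pairwise_cons.mpr ⟨?_, ih3⟩
          intro d hd
          obtain ⟨p, hp, hpe⟩ := List.mem_map.mp hd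
          exact hpe ▸ hgt _ (ih1 p hp).1
  intro l
  exact H l.length l le_rfl

-- the count table over the original string, seen on B's sorted letter list
theorem pv_cnt_eq_count (l : List Char) (i : Nat) (h26 : i < 26) :
    pvCnt l i =
      ((PySem.List.sorted ((PySem.Chars.lower l).filter
          (fun c => decide ('a' ≤ c) && decide (c ≤ 'z'))) (fun x => x) false).count
        (Char.ofNat (97 + i)) : Int) := by
  have htn : (Char.ofNat (97 + i)).toNat = 97 + i := pv_toNat_ofNat_letter i h26
  have hp : (decide ('a' ≤ Char.ofNat (97 + i)) && decide (Char.ofNat (97 + i) ≤ 'z')) = true := by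
    simp only [Bool.and_eq_true, decide_eq_true_eq]
    exact ⟨pv_le_of_toNat (by omega), pv_toNat_le_of (by omega)⟩
  have hperm : (PySem.List.sorted ((PySem.Chars.lower l).filter
      (fun c => decide ('a' ≤ c) && decide (c ≤ 'z'))) (fun x => x) false).Perm
      ((PySem.Chars.lower l).filter (fun c => decide ('a' ≤ c) && decide (c ≤ 'z'))) :=
    PySem.List.sorted_perm _ _ _
  rw [pvCnt, hperm.count_eq,
    List.count_filter (p := fun c => decide ('a' ≤ c) && decide (c ≤ 'z'))
      (a := Char.ofNat (97 + i)) (l := PySem.Chars.lower l) hp]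
  have : (PySem.Chars.lower l).count (Char.ofNat (97 + i)) =
      l.countP (fun x => PySem.Chars.lowerChar x == Char.ofNat (97 + i)) := by
    show ((l.map PySem.Chars.lowerChar).count _) = _
    simp [List.count_eq_countP, List.countP_map, Function.comp_def]
  rw [this]

theorem pv_B_good (l : List Char) :
    pvGood l (pvRunScan (PySem.List.sorted ((PySem.Chars.lower l).filter
      (fun c => decide ('a' ≤ c) && decide (c ≤ 'z'))) (fun x => x) false) 0 0) := by
  set LS : List Char := PySem.List.sorted ((PySem.Chars.lower l).filter
    (fun c => decide ('a' ≤ c) && decide (c ≤ 'z'))) (fun x => x) false with hLSdef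
  have hpw : LS.Pairwise (· ≤ ·) := by
    have := PySem.List.sorted_pairwise (xs := (PySem.Chars.lower l).filter
      (fun c => decide ('a' ≤ c) && decide (c ≤ 'z'))) (key := fun x => x)
    simpa [← hLSdef] using this
  obtain ⟨h1, h2, h3⟩ := pv_runs_sorted LS hpw
  have hcnt : ∀ i, i < 26 → pvCnt l i = (LS.count (Char.ofNat (97 + i)) : Int) := by
    intro i hi
    rw [pv_cnt_eq_count l i hi]
  have hlet : ∀ x ∈ LS, 97 ≤ x.toNat ∧ x.toNat ≤ 122 := by
    intro x hx
    have hx' : x ∈ (PySem.Chars.lower l).filter (fun c => decide ('a' ≤ c) && decide (c ≤ 'z')) := by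
      rw [hLSdef] at hx
      exact (PySem.List.mem_sorted _ _ _ _).mp hx
    have hpx := (List.mem_filter.mp hx').2
    simp only [Bool.and_eq_true, decide_eq_true_eq] at hpx
    exact ⟨pv_le_toNat hpx.1, pv_toNat_le hpx.2⟩
  rw [pv_runScan_eq_argFold]
  by_cases hnil : LS = []
  · rw [hnil]
    have hz : pvArgFold (pvRuns []) 0 0 = 0 := by simp [pvRuns, pvArgFold]
    rw [hz]
    refine ⟨by norm_num, ?_, ?_⟩
    · intro i hi
      rw [hcnt i hi, hcnt 0 (by norm_num), hnil]
      simp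
    · intro j hj
      exact absurd hj (Nat.not_lt_zero j)
  · obtain ⟨c, rest, hLS⟩ := List.exists_cons_of_ne_nil hnil
    have hcm : c ∈ LS := by rw [hLS]; exact List.mem_cons_self
    obtain ⟨n, hn⟩ := h2 c hcm
    have hnc : n = LS.count c := (h1 _ hn).2
    have hpos : 0 < n := by rw [hnc]; exact List.count_pos_iff.mpr hcm
    obtain ⟨k, hk, hEq, hlt, hmax, hfirst⟩ := pv_argFold_spec (pvRuns LS) 0 0 ⟨(c, n), hn, hpos⟩
    have hkmem : (pvRuns LS)[k] ∈ pvRuns LS := List.getElem_mem _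
    have hc₀ : ((pvRuns LS)[k]).1 ∈ LS := (h1 _ hkmem).1
    have hNc : ((pvRuns LS)[k]).2 = LS.count ((pvRuns LS)[k]).1 := (h1 _ hkmem).2
    obtain ⟨hge, hle97⟩ := hlet _ hc₀
    rw [hEq]
    have hr26 : ((pvRuns LS)[k]).1.toNat - 97 < 26 := by omega
    have hchr : Char.ofNat (97 + (((pvRuns LS)[k]).1.toNat - 97)) = ((pvRuns LS)[k]).1 :=
      pv_char_eq_of_toNat _ _ (by rw [pv_toNat_ofNat_letter _ hr26]; omega)
    refine ⟨hr26, ?_, ?_⟩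
    · intro i hi
      rw [hcnt i hi, hcnt _ hr26, hchr, ← hNc]
      by_cases hmem : Char.ofNat (97 + i) ∈ LS
      · obtain ⟨m, hm⟩ := h2 _ hmem
        have hmc : m = LS.count (Char.ofNat (97 + i)) := (h1 _ hm).2
        obtain ⟨jdx, hjdx, hjeq⟩ := List.mem_iff_getElem.mp hm
        have hle' := hmax jdx hjdx
        rw [hjeq] at hle'
        rw [← hmc]
        exact_mod_cast hle'
      · rw [List.count_eq_zero.mpr hmem]
        exact_mod_cast Nat.zero_le _
    · intro j hj
      have hj26 : j < 26 := by omega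
      rw [hcnt j hj26, hcnt _ hr26, hchr, ← hNc]
      have hcj : Char.ofNat (97 + j) < ((pvRuns LS)[k]).1 :=
        pv_lt_of_toNat (by rw [pv_toNat_ofNat_letter _ hj26]; omega)
      by_cases hmem : Char.ofNat (97 + j) ∈ LS
      · obtain ⟨m, hm⟩ := h2 _ hmem
        have hmc : m = LS.count (Char.ofNat (97 + j)) := (h1 _ hm).2
        obtain ⟨jdx, hjdx, hjeq⟩ := List.mem_iff_getElem.mp hm
        have hpair := List.pairwise_iff_getElem.mp h3
        have hjk : jdx < k := by
          rcases Nat.lt_trichotomy jdx k with hlt' | heq' | hgt'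
          · exact hlt'
          · exfalso
            subst heq'
            have hfst : ((pvRuns LS)[jdx]).1 = Char.ofNat (97 + j) := by rw [hjeq]
            rw [hfst] at hcj
            exact lt_irrefl _ hcj
          · exfalso
            have := hpair k jdx (by simpa using hk) (by simpa using hjdx) hgt'
            simp only [List.getElem_map] at this
            rw [hjeq] at this
            exact absurd hcj (asymm this)
        have hlt'' := hfirst jdx hjk
        rw [hjeq] at hlt''
        rw [← hmc]
        exact_mod_cast hlt''
      · rw [List.count_eq_zero.mpr hmem]
        exact_mod_cast hlt

-- ===== VERDICT (by name: the statement is the Claim_ definition above) =====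
theorem findMaxCharInString_spec : Claim_equal_findMaxCharInString := by
  intro s _
  unfold Spec_findMaxCharInString findMaxCharInString findMaxCharInString_alt
  obtain ⟨rA, hgA, hA⟩ := pv_A_good s.toList
  have hB := pv_B_good s.toList
  simp only []
  rw [hA, pvGood_unique s.toList rA _ hgA hB]
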